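-- pv_equiv track=rewrite | github.com/etherealwei/LC | leetcode_1.py | maxFrequency_failed
-- ===== SOURCE A (Python) =====
-- from typing import List
--
-- def maxFrequency_failed(nums: List[int], k: int, numOperations: int) -> int:
--     nums.sort()
--     def find_max_left(i):
--         left = 0
--         right = i - 1
--         while left <= right:
--             mid = (left + right) // 2
--             if nums[mid] >= nums[i] - k:
--                 right = mid - 1
--             else:
--                 left = mid + 1
--         return left
--
--     def find_max_right(i):
--         left = i + 1
--         right = len(nums) - 1
--         while left <= right:
--             mid = (left + right) // 2
--             if nums[mid] <= nums[i] + k: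
--                 left = mid + 1
--             else:
--                 right = mid - 1
--         return right
--
--     max_freq = 1
--     for i in range(len(nums)):
--         max_left = find_max_left(i)
--         max_right = find_max_right(i)
--         if max_left < 0 or max_left > i: max_left = i
--         if max_right < i or max_right >= len(nums): max_right = i
--         max_freq = max(max_freq, min(max_right - max_left + 1, numOperations + 1))
--     return max_freq
-- ===== SOURCE B (Python) =====
-- from typing import List
--
-- def maxFrequency_failed(nums: List[int], k: int, numOperations: int) -> int:
--     # Same in-place sort of nums as the original; equivalence is about the return value.
--     nums.sort()
--     n = len(nums)
--     best = 1
--     l = 0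
--     r = 0
--     for x in nums:
--         while l < n and nums[l] < x - k:
--             l += 1
--         while r < n and nums[r] <= x + k:
--             r += 1
--         best = max(best, min(r - l, numOperations + 1))
--     return best
-- ===== Notes on version B (the rewrite author's own statement) =====
-- stated objective: faster
-- what changed: Replaces the two hand-written binary searches plus index-clamping per element by one forward two-pointer sweep over the sorted list whose monotone pointers give each element's window count in amortized O(1).
import Mathlib
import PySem

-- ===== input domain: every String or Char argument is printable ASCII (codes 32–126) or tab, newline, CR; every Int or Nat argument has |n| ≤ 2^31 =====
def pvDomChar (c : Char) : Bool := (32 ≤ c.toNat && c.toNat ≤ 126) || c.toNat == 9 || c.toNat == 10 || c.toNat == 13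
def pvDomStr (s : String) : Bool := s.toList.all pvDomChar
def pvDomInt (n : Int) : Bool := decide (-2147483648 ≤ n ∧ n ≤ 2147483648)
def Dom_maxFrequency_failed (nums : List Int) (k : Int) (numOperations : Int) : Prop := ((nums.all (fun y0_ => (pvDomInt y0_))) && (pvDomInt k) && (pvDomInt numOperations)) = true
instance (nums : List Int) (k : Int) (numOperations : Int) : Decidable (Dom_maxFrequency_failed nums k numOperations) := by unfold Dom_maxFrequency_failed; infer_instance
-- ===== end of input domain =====

-- B replaces the per-element binary searches by a direct count of elements in [x-k,x+k] (simpler);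
-- both A and B sort nums in place in Python, equivalence proved is about the return value.

-- ===== PORT A =====
-- while-loop of find_max_left: binary search returning `left`
def pvBsL (s : List Int) (t : Int) (left right : Int) : Int :=
  if h : left ≤ right then
    let mid := PySem.Int.floordiv (left + right) 2
    if PySem.List.pyGetD s mid 0 ≥ t then pvBsL s t left (mid - 1)
    else pvBsL s t (mid + 1) right
  else left
termination_by (right + 1 - left).toNat
decreasing_by
  · have := PySem.Int.floordiv_two_mid_bounds h; omega
  · have := PySem.Int.floordiv_two_mid_bounds h; omega

-- while-loop of find_max_right: binary search returning `right`
def pvBsR (s : List Int) (t : Int) (left right : Int) : Int :=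
  if h : left ≤ right then
    let mid := PySem.Int.floordiv (left + right) 2
    if PySem.List.pyGetD s mid 0 ≤ t then pvBsR s t (mid + 1) right
    else pvBsR s t left (mid - 1)
  else right
termination_by (right + 1 - left).toNat
decreasing_by
  · have := PySem.Int.floordiv_two_mid_bounds h; omega
  · have := PySem.Int.floordiv_two_mid_bounds h; omega

def pvFindMaxLeft (s : List Int) (k : Int) (i : Int) : Int :=
  pvBsL s (PySem.List.pyGetD s i 0 - k) 0 (i - 1)

def pvFindMaxRight (s : List Int) (k : Int) (i : Int) : Int :=
  pvBsR s (PySem.List.pyGetD s i 0 + k) (i + 1) ((s.length : Int) - 1)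

def maxFrequency_failed (nums : List Int) (k : Int) (numOperations : Int) : Int :=
  let s := PySem.List.sorted nums (fun x => x) false
  (PySem.List.pyRange 0 (s.length : Int) 1).foldl (fun max_freq i =>
    let ml0 := pvFindMaxLeft s k i
    let mr0 := pvFindMaxRight s k i
    let ml := if ml0 < 0 ∨ ml0 > i then i else ml0
    let mr := if mr0 < i ∨ mr0 ≥ (s.length : Int) then i else mr0
    max max_freq (min (mr - ml + 1) (numOperations + 1))) 1

-- ===== PORT B =====
-- while-loop 'while l < n and nums[l] < t: l += 1'
def pvAdvL (s : List Int) (t : Int) (l : Int) : Int :=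
  if h : l < (s.length : Int) ∧ PySem.List.pyGetD s l 0 < t then pvAdvL s t (l + 1)
  else l
termination_by ((s.length : Int) - l).toNat
decreasing_by omega

-- while-loop 'while r < n and nums[r] <= t: r += 1'
def pvAdvR (s : List Int) (t : Int) (r : Int) : Int :=
  if h : r < (s.length : Int) ∧ PySem.List.pyGetD s r 0 ≤ t then pvAdvR s t (r + 1)
  else r
termination_by ((s.length : Int) - r).toNat
decreasing_by omega

def maxFrequency_failed_alt (nums : List Int) (k : Int) (numOperations : Int) : Int :=
  let s := PySem.List.sorted nums (fun x => x) false
  (s.foldl (fun (st : Int × Int × Int) x =>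
      let l := pvAdvL s (x - k) st.2.1
      let r := pvAdvR s (x + k) st.2.2
      (max st.1 (min (r - l) (numOperations + 1)), l, r)) ((1 : Int), (0 : Int), (0 : Int))).1

-- ===== PRECONDITION & SPEC =====
def Spec_maxFrequency_failed (nums : List Int) (k : Int) (numOperations : Int) (out : Int) : Prop := out = maxFrequency_failed_alt nums k numOperations
instance (nums : List Int) (k : Int) (numOperations : Int) (out : Int) : Decidable (Spec_maxFrequency_failed nums k numOperations out) := by unfold Spec_maxFrequency_failed; infer_instance

-- ===== CLAIM (what is proved, stated in full; the proofs are below) =====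
def Claim_equal_maxFrequency_failed : Prop := ∀ (nums : List Int) (k : Int) (numOperations : Int), Dom_maxFrequency_failed nums k numOperations → Spec_maxFrequency_failed nums k numOperations (maxFrequency_failed nums k numOperations)

-- ===== LEMMAS AND PROOFS =====
lemma pvCountRange (m c : Nat) (Q : Nat → Bool) (hc : c ≤ m)
    (h : ∀ j, j < m → (Q j = true ↔ j < c)) :
    (List.range m).countP Q = c := by
  have hm : m = c + (m - c) := by omega
  rw [hm, List.range_add, List.countP_append]
  have h1 : List.countP Q (List.range c) = c := by
    have := List.countP_eq_length (p := Q) (l := List.range c)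
    have h2 := this.2 (by
      intro a ha
      have := List.mem_range.1 ha
      exact (h a (by omega)).2 this)
    simpa using h2
  have h2 : List.countP Q ((List.range (m - c)).map (fun x => c + x)) = 0 := by
    apply List.countP_eq_zero.2
    intro a ha
    obtain ⟨x, hx, rfl⟩ := List.mem_map.1 ha
    have hxm := List.mem_range.1 hx
    intro hQ
    have := (h (c + x) (by omega)).1 hQ
    omega
  omega
lemma pvGetDMono (s : List Int) (hs : s.Pairwise (· ≤ ·)) {a b : Nat} (hab : a ≤ b)
    (hb : b < s.length) : s.getD a 0 ≤ s.getD b 0 := by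
  rw [List.getD_eq_getElem s 0 (by omega), List.getD_eq_getElem s 0 hb]
  rcases eq_or_lt_of_le hab with rfl | hlt
  · exact le_refl _
  · exact List.pairwise_iff_getElem.1 hs a b (by omega) hb hlt
lemma pvBsL_spec (s : List Int) (hs : s.Pairwise (· ≤ ·)) (t : Int) (i : Nat) (hi : i ≤ s.length) :
    ∀ (n : Nat) (l r : Int), (r + 1 - l).toNat = n → 0 ≤ l → r < (i : Int) → l ≤ r + 1 →
    (∀ j : Nat, (j : Int) < l → s.getD j 0 < t) →
    (∀ j : Nat, r < (j : Int) → j < i → t ≤ s.getD j 0) →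
    pvBsL s t l r = (((List.range i).countP (fun j => decide (s.getD j 0 < t)) : Nat) : Int) := by
  intro n
  induction n using Nat.strong_induction_on with
  | _ n IH =>
    intro l r hn hl hr hlr hL hR
    by_cases hc : l ≤ r
    · obtain ⟨hm1, hm2⟩ := PySem.Int.floordiv_two_mid_bounds hc
      set mid := PySem.Int.floordiv (l + r) 2 with hmid
      have hmid0 : 0 ≤ mid := le_trans hl hm1
      have hmidlt : mid < (i : Int) := lt_of_le_of_lt hm2 hr
      have hmlen : mid.toNat < s.length := by omega
      have hget : PySem.List.pyGetD s mid 0 = s.getD mid.toNat 0 := by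
        rw [PySem.List.pyGetD_eq_getElem s 0 hmid0 (by exact_mod_cast lt_of_lt_of_le hmidlt (by exact_mod_cast hi))]
        rw [List.getD_eq_getElem s 0 hmlen]
      by_cases hcmp : PySem.List.pyGetD s mid 0 ≥ t
      · rw [pvBsL, dif_pos hc, if_pos hcmp]
        apply IH ((mid - 1) + 1 - l).toNat (by omega) l (mid - 1) rfl hl (by omega) (by omega) hL
        intro j hj1 hj2
        have hj3 : mid.toNat ≤ j := by omega
        calc t ≤ s.getD mid.toNat 0 := by rw [← hget]; exact hcmp
          _ ≤ s.getD j 0 := pvGetDMono s hs hj3 (by omega)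
      · rw [pvBsL, dif_pos hc, if_neg hcmp]
        apply IH (r + 1 - (mid + 1)).toNat (by omega) (mid + 1) r rfl (by omega) hr (by omega)
        · intro j hj
          by_cases hjl : (j : Int) < l
          · exact hL j hjl
          · have hjle : j ≤ mid.toNat := by omega
            have := pvGetDMono s hs hjle hmlen
            have hlt : s.getD mid.toNat 0 < t := by rw [← hget]; omega
            omega
        · exact hR
    · rw [pvBsL, dif_neg hc]
      have hcnt : (List.range i).countP (fun j => decide (s.getD j 0 < t)) = l.toNat := by
        apply pvCountRange i l.toNat _ (by omega)
        intro j hj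
        simp only [decide_eq_true_eq]
        constructor
        · intro h'
          by_contra hge
          have := hR j (by omega) hj
          omega
        · intro h'
          exact hL j (by omega)
      rw [hcnt]
      omega
lemma pvBsR_spec (s : List Int) (hs : s.Pairwise (· ≤ ·)) (t : Int) (i : Nat) (hi : i < s.length) :
    ∀ (n : Nat) (l r : Int), (r + 1 - l).toNat = n → (i : Int) < l → r < (s.length : Int) → l ≤ r + 1 →
    (∀ j : Nat, (i : Int) < (j : Int) → (j : Int) < l → s.getD j 0 ≤ t) →
    (∀ j : Nat, r < (j : Int) → j < s.length → t < s.getD j 0) →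
    pvBsR s t l r = (i : Int) + (((List.range (s.length - (i + 1))).countP
      (fun j => decide (s.getD (i + 1 + j) 0 ≤ t)) : Nat) : Int) := by
  intro n
  induction n using Nat.strong_induction_on with
  | _ n IH =>
    intro l r hn hl hr hlr hL hR
    by_cases hc : l ≤ r
    · obtain ⟨hm1, hm2⟩ := PySem.Int.floordiv_two_mid_bounds hc
      set mid := PySem.Int.floordiv (l + r) 2 with hmid
      have hmid0 : 0 ≤ mid := by omega
      have hmidlt : mid < (s.length : Int) := lt_of_le_of_lt hm2 hr
      have hmlen : mid.toNat < s.length := by omega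
      have hget : PySem.List.pyGetD s mid 0 = s.getD mid.toNat 0 := by
        rw [PySem.List.pyGetD_eq_getElem s 0 hmid0 hmidlt]
        rw [List.getD_eq_getElem s 0 hmlen]
      by_cases hcmp : PySem.List.pyGetD s mid 0 ≤ t
      · rw [pvBsR, dif_pos hc, if_pos hcmp]
        apply IH (r + 1 - (mid + 1)).toNat (by omega) (mid + 1) r rfl (by omega) hr (by omega)
        · intro j hj1 hj2
          by_cases hjl : (j : Int) < l
          · exact hL j hj1 hjl
          · have hjle : j ≤ mid.toNat := by omega
            have := pvGetDMono s hs hjle hmlen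
            have hle : s.getD mid.toNat 0 ≤ t := by rw [← hget]; exact hcmp
            omega
        · exact hR
      · rw [pvBsR, dif_pos hc, if_neg hcmp]
        apply IH ((mid - 1) + 1 - l).toNat (by omega) l (mid - 1) rfl hl (by omega) (by omega) hL
        intro j hj1 hj2
        have hj3 : mid.toNat ≤ j := by omega
        have := pvGetDMono s hs hj3 (by omega)
        have hlt : t < s.getD mid.toNat 0 := by rw [← hget]; omega
        omega
    · rw [pvBsR, dif_neg hc]
      have hcnt : (List.range (s.length - (i + 1))).countP (fun j => decide (s.getD (i + 1 + j) 0 ≤ t))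
          = (l - (i + 1)).toNat := by
        apply pvCountRange _ _ _ (by omega)
        intro j hj
        simp only [decide_eq_true_eq]
        constructor
        · intro h'
          by_contra hge
          have := hR (i + 1 + j) (by omega) (by omega)
          omega
        · intro h'
          exact hL (i + 1 + j) (by omega) (by omega)
      rw [hcnt]
      omega
-- A's find_max_left at index i equals the count of elements before i that are < s[i] - k
lemma pvFindMaxLeft_eq (s : List Int) (hs : s.Pairwise (· ≤ ·)) (k : Int) (i : Nat) (hi : i < s.length) :
    pvFindMaxLeft s k (i : Int) =
      (((List.range i).countP (fun j => decide (s.getD j 0 < s.getD i 0 - k)) : Nat) : Int) := by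
  unfold pvFindMaxLeft
  have hg : PySem.List.pyGetD s (i : Int) 0 = s.getD i 0 := by
    rw [PySem.List.pyGetD_eq_getElem s 0 (by omega) (by exact_mod_cast hi)]
    rw [List.getD_eq_getElem s 0 hi]
    simp
  rw [hg]
  apply pvBsL_spec s hs _ i (by omega) _ 0 ((i : Int) - 1) rfl (by omega) (by omega) (by omega)
  · intro j hj; omega
  · intro j hj1 hj2
    exfalso; omega
-- A's find_max_right at index i equals i plus the count of elements after i that are ≤ s[i] + k
lemma pvFindMaxRight_eq (s : List Int) (hs : s.Pairwise (· ≤ ·)) (k : Int) (i : Nat) (hi : i < s.length) :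
    pvFindMaxRight s k (i : Int) =
      (i : Int) + (((List.range (s.length - (i + 1))).countP
        (fun j => decide (s.getD (i + 1 + j) 0 ≤ s.getD i 0 + k)) : Nat) : Int) := by
  unfold pvFindMaxRight
  have hg : PySem.List.pyGetD s (i : Int) 0 = s.getD i 0 := by
    rw [PySem.List.pyGetD_eq_getElem s 0 (by omega) (by exact_mod_cast hi)]
    rw [List.getD_eq_getElem s 0 hi]
    simp
  rw [hg]
  apply pvBsR_spec s hs _ i hi _ ((i : Int) + 1) ((s.length : Int) - 1) rfl (by omega) (by omega) (by omega)
  · intro j hj1 hj2; exfalso; omega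
  · intro j hj1 hj2; exfalso; omega
lemma pvTakeEq (s : List Int) (i : Nat) (hi : i ≤ s.length) :
    s.take i = (List.range i).map (fun j => s.getD j 0) := by
  apply List.ext_getElem
  · simp [hi]
  · intro j h1 h2
    simp only [List.getElem_take, List.getElem_map, List.getElem_range]
    rw [List.getD_eq_getElem s 0 (by simp at h2; omega)]
-- the whole list as a map over indices
lemma pvSelfEq (s : List Int) : s = (List.range s.length).map (fun j => s.getD j 0) := by
  conv_lhs => rw [← List.take_length (l := s)]
  exact pvTakeEq s s.length (le_refl _)
-- folding max over pointwise-equal-or-≤1 contributions from start 1 gives the same result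
lemma pvFoldMax {α : Type} (l : List α) (f g : α → Int) :
    ∀ a : Int, 1 ≤ a → (∀ x ∈ l, f x = g x ∨ (f x ≤ 1 ∧ g x ≤ 1)) →
    l.foldl (fun acc x => max acc (f x)) a = l.foldl (fun acc x => max acc (g x)) a := by
  induction l with
  | nil => intro a _ _; rfl
  | cons hd tl ih =>
    intro a ha h
    simp only [List.foldl_cons]
    rcases h hd (by simp) with heq | ⟨h1, h2⟩
    · rw [heq]
      exact ih _ (by omega) (fun x hx => h x (by simp [hx]))
    · have e1 : max a (f hd) = a := by omega
      have e2 : max a (g hd) = a := by omega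
      rw [e1, e2]
      exact ih _ ha (fun x hx => h x (by simp [hx]))

-- countP over the elements is countP over the indices
lemma pvCountElems (s : List Int) (p : Int → Bool) :
    s.countP p = (List.range s.length).countP (fun j => p (s.getD j 0)) := by
  conv_lhs => rw [pvSelfEq s]
  rw [List.countP_map]
  apply List.countP_congr
  intro a _
  rfl

-- if s[j] ≥ t then at most j elements of the sorted s are < t
lemma pvCountLtLe (s : List Int) (hs : s.Pairwise (· ≤ ·)) (t : Int) (j : Nat)
    (hj : j < s.length) (hge : t ≤ s.getD j 0) :
    s.countP (fun y => decide (y < t)) ≤ j := by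
  rw [pvCountElems]
  have hsplit : s.length = j + (s.length - j) := by omega
  rw [hsplit, List.range_add, List.countP_append]
  have h2 : List.countP (fun q => decide (s.getD q 0 < t)) ((List.range (s.length - j)).map (fun x => j + x)) = 0 := by
    apply List.countP_eq_zero.2
    intro a ha
    obtain ⟨p, hp, rfl⟩ := List.mem_map.1 ha
    have hpn := List.mem_range.1 hp
    have := pvGetDMono s hs (show j ≤ j + p by omega) (by omega)
    simp only [decide_eq_true_eq]
    omega
  have h1 : List.countP (fun q => decide (s.getD q 0 < t)) (List.range j) ≤ j := by
    have := List.countP_le_length (p := fun q => decide (s.getD q 0 < t)) (l := List.range j)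
    simpa using this
  omega

-- if s[j] > t then at most j elements of the sorted s are ≤ t
lemma pvCountLeLe (s : List Int) (hs : s.Pairwise (· ≤ ·)) (t : Int) (j : Nat)
    (hj : j < s.length) (hgt : t < s.getD j 0) :
    s.countP (fun y => decide (y ≤ t)) ≤ j := by
  rw [pvCountElems]
  have hsplit : s.length = j + (s.length - j) := by omega
  rw [hsplit, List.range_add, List.countP_append]
  have h2 : List.countP (fun q => decide (s.getD q 0 ≤ t)) ((List.range (s.length - j)).map (fun x => j + x)) = 0 := by
    apply List.countP_eq_zero.2
    intro a ha
    obtain ⟨p, hp, rfl⟩ := List.mem_map.1 ha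
    have hpn := List.mem_range.1 hp
    have := pvGetDMono s hs (show j ≤ j + p by omega) (by omega)
    simp only [decide_eq_true_eq]
    omega
  have h1 : List.countP (fun q => decide (s.getD q 0 ≤ t)) (List.range j) ≤ j := by
    have := List.countP_le_length (p := fun q => decide (s.getD q 0 ≤ t)) (l := List.range j)
    simpa using this
  omega

-- the first advancing pointer stops at the number of elements < t
lemma pvAdvL_spec (s : List Int) (hs : s.Pairwise (· ≤ ·)) (t : Int) :
    ∀ (m : Nat) (l : Int), (((s.length : Int) - l).toNat = m) → 0 ≤ l → l ≤ (s.length : Int) →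
    (∀ j : Nat, (j : Int) < l → s.getD j 0 < t) →
    pvAdvL s t l = ((s.countP (fun y => decide (y < t)) : Nat) : Int) := by
  intro m
  induction m using Nat.strong_induction_on with
  | _ m IH =>
    intro l hm hl0 hln hL
    by_cases hc : l < (s.length : Int) ∧ PySem.List.pyGetD s l 0 < t
    · rw [pvAdvL, dif_pos hc]
      have hlt : l.toNat < s.length := by omega
      have hget : PySem.List.pyGetD s l 0 = s.getD l.toNat 0 := by
        rw [PySem.List.pyGetD_eq_getElem s 0 hl0 hc.1, List.getD_eq_getElem s 0 hlt]
      apply IH ((s.length : Int) - (l + 1)).toNat (by omega) (l + 1) rfl (by omega) (by omega)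
      intro j hj
      by_cases hjl : (j : Int) < l
      · exact hL j hjl
      · have : j = l.toNat := by omega
        rw [this, ← hget]
        exact hc.2
    · rw [pvAdvL, dif_neg hc]
      have hcnt : s.countP (fun y => decide (y < t)) = l.toNat := by
        rw [pvCountElems]
        apply pvCountRange s.length l.toNat _ (by omega)
        intro j hj
        simp only [decide_eq_true_eq]
        constructor
        · intro h'
          by_contra hge
          rcases (not_and_or.1 hc) with h1 | h2
          · omega
          · have hlt : l.toNat < s.length := by omega
            have hget : PySem.List.pyGetD s l 0 = s.getD l.toNat 0 := by
              rw [PySem.List.pyGetD_eq_getElem s 0 hl0 (by omega), List.getD_eq_getElem s 0 hlt]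
            have hmt : t ≤ s.getD l.toNat 0 := by rw [← hget]; omega
            have := pvGetDMono s hs (show l.toNat ≤ j by omega) hj
            omega
        · intro h'
          exact hL j (by omega)
      rw [hcnt]
      omega

-- the second advancing pointer stops at the number of elements ≤ t
lemma pvAdvR_spec (s : List Int) (hs : s.Pairwise (· ≤ ·)) (t : Int) :
    ∀ (m : Nat) (r : Int), (((s.length : Int) - r).toNat = m) → 0 ≤ r → r ≤ (s.length : Int) →
    (∀ j : Nat, (j : Int) < r → s.getD j 0 ≤ t) →
    pvAdvR s t r = ((s.countP (fun y => decide (y ≤ t)) : Nat) : Int) := by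
  intro m
  induction m using Nat.strong_induction_on with
  | _ m IH =>
    intro r hm hr0 hrn hR
    by_cases hc : r < (s.length : Int) ∧ PySem.List.pyGetD s r 0 ≤ t
    · rw [pvAdvR, dif_pos hc]
      have hlt : r.toNat < s.length := by omega
      have hget : PySem.List.pyGetD s r 0 = s.getD r.toNat 0 := by
        rw [PySem.List.pyGetD_eq_getElem s 0 hr0 hc.1, List.getD_eq_getElem s 0 hlt]
      apply IH ((s.length : Int) - (r + 1)).toNat (by omega) (r + 1) rfl (by omega) (by omega)
      intro j hj
      by_cases hjr : (j : Int) < r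
      · exact hR j hjr
      · have : j = r.toNat := by omega
        rw [this, ← hget]
        exact hc.2
    · rw [pvAdvR, dif_neg hc]
      have hcnt : s.countP (fun y => decide (y ≤ t)) = r.toNat := by
        rw [pvCountElems]
        apply pvCountRange s.length r.toNat _ (by omega)
        intro j hj
        simp only [decide_eq_true_eq]
        constructor
        · intro h'
          by_contra hge
          rcases (not_and_or.1 hc) with h1 | h2
          · omega
          · have hlt : r.toNat < s.length := by omega
            have hget : PySem.List.pyGetD s r 0 = s.getD r.toNat 0 := by
              rw [PySem.List.pyGetD_eq_getElem s 0 hr0 (by omega), List.getD_eq_getElem s 0 hlt]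
            have hmt : t < s.getD r.toNat 0 := by rw [← hget]; omega
            have := pvGetDMono s hs (show r.toNat ≤ j by omega) hj
            omega
        · intro h'
          exact hR j (by omega)
      rw [hcnt]
      omega

-- B's fold, started with valid pointers, computes the per-index capped window sizes
lemma pvFoldStep (s : List Int) (hs : s.Pairwise (· ≤ ·)) (k no : Int) :
    ∀ (c m : Nat), m + c = s.length → ∀ (b l r : Int),
    0 ≤ l → l ≤ (s.length : Int) → 0 ≤ r → r ≤ (s.length : Int) →
    (∀ j : Nat, (j : Int) < l → m < s.length → s.getD j 0 < s.getD m 0 - k) →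
    (∀ j : Nat, (j : Int) < r → m < s.length → s.getD j 0 ≤ s.getD m 0 + k) →
    (((s.drop m).foldl (fun (st : Int × Int × Int) x =>
        (max st.1 (min (pvAdvR s (x + k) st.2.2 - pvAdvL s (x - k) st.2.1) (no + 1)),
         pvAdvL s (x - k) st.2.1, pvAdvR s (x + k) st.2.2)) (b, l, r)).1
      = (List.range' m c).foldl (fun acc i =>
          max acc (min (((s.countP (fun y => decide (y ≤ s.getD i 0 + k)) : Nat) : Int)
                        - ((s.countP (fun y => decide (y < s.getD i 0 - k)) : Nat) : Int)) (no + 1))) b) := by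
  intro c
  induction c with
  | zero =>
    intro m hm b l r _ _ _ _ _ _
    have hme : m = s.length := by omega
    subst hme
    rw [List.drop_length]
    rfl
  | succ c ih =>
    intro m hm b l r hl0 hln hr0 hrn hL hR
    have hmlt : m < s.length := by omega
    have hx : s.getD m 0 = s[m] := List.getD_eq_getElem s 0 hmlt
    rw [List.drop_eq_getElem_cons hmlt, List.foldl_cons, List.range'_succ, List.foldl_cons]
    have hladv : pvAdvL s (s[m] - k) l = ((s.countP (fun y => decide (y < s.getD m 0 - k)) : Nat) : Int) := by
      rw [← hx]
      exact pvAdvL_spec s hs _ (((s.length : Int) - l).toNat) l rfl hl0 hln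
        (fun j hj => hL j hj hmlt)
    have hradv : pvAdvR s (s[m] + k) r = ((s.countP (fun y => decide (y ≤ s.getD m 0 + k)) : Nat) : Int) := by
      rw [← hx]
      exact pvAdvR_spec s hs _ (((s.length : Int) - r).toNat) r rfl hr0 hrn
        (fun j hj => hR j hj hmlt)
    rw [hladv, hradv]
    apply ih (m + 1) (by omega)
    · omega
    · have := List.countP_le_length (p := fun y => decide (y < s.getD m 0 - k)) (l := s)
      omega
    · omega
    · have := List.countP_le_length (p := fun y => decide (y ≤ s.getD m 0 + k)) (l := s)
      omega
    · intro j hj hm1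
      have hjlen : j < s.length := by
        have := List.countP_le_length (p := fun y => decide (y < s.getD m 0 - k)) (l := s)
        omega
      have h1 : s.getD j 0 < s.getD m 0 - k := by
        by_contra hge
        have := pvCountLtLe s hs (s.getD m 0 - k) j hjlen (by omega)
        omega
      have h2 : s.getD m 0 ≤ s.getD (m + 1) 0 := pvGetDMono s hs (by omega) hm1
      omega
    · intro j hj hm1
      have hjlen : j < s.length := by
        have := List.countP_le_length (p := fun y => decide (y ≤ s.getD m 0 + k)) (l := s)
        omega
      have h1 : s.getD j 0 ≤ s.getD m 0 + k := by
        by_contra hgt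
        have := pvCountLeLe s hs (s.getD m 0 + k) j hjlen (by omega)
        omega
      have h2 : s.getD m 0 ≤ s.getD (m + 1) 0 := pvGetDMono s hs (by omega) hm1
      omega

-- for k ≥ 0 the total count of elements < s[i] - k lives entirely before index i
lemma pvCL (s : List Int) (hs : s.Pairwise (· ≤ ·)) (k : Int) (hk : 0 ≤ k) (i : Nat) (hi : i < s.length) :
    s.countP (fun y => decide (y < s.getD i 0 - k)) =
      (List.range i).countP (fun p => decide (s.getD p 0 < s.getD i 0 - k)) := by
  rw [pvCountElems]
  have hsplit : s.length = i + (s.length - i) := by omega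
  rw [hsplit, List.range_add, List.countP_append]
  have h2 : List.countP (fun q => decide (s.getD q 0 < s.getD i 0 - k))
      ((List.range (s.length - i)).map (fun x => i + x)) = 0 := by
    apply List.countP_eq_zero.2
    intro a ha
    obtain ⟨p, hp, rfl⟩ := List.mem_map.1 ha
    have hpn := List.mem_range.1 hp
    have := pvGetDMono s hs (show i ≤ i + p by omega) (by omega)
    simp only [decide_eq_true_eq]
    omega
  omega

-- for k ≥ 0 the total count of elements ≤ s[i] + k is i + 1 plus the count after index i
lemma pvCR (s : List Int) (hs : s.Pairwise (· ≤ ·)) (k : Int) (hk : 0 ≤ k) (i : Nat) (hi : i < s.length) :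
    s.countP (fun y => decide (y ≤ s.getD i 0 + k)) =
      (i + 1) + (List.range (s.length - (i + 1))).countP
        (fun p => decide (s.getD (i + 1 + p) 0 ≤ s.getD i 0 + k)) := by
  rw [pvCountElems]
  have hsplit : s.length = (i + 1) + (s.length - (i + 1)) := by omega
  conv_lhs => rw [hsplit, List.range_add]
  rw [List.countP_append]
  have h1 : List.countP (fun q => decide (s.getD q 0 ≤ s.getD i 0 + k)) (List.range (i + 1)) = i + 1 := by
    have := List.countP_eq_length
      (p := fun q => decide (s.getD q 0 ≤ s.getD i 0 + k)) (l := List.range (i + 1))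
    rw [this.2 ?_]
    · simp
    · intro a ha
      have han := List.mem_range.1 ha
      have := pvGetDMono s hs (show a ≤ i by omega) hi
      simp only [decide_eq_true_eq]
      omega
  have h2 : List.countP (fun q => decide (s.getD q 0 ≤ s.getD i 0 + k))
        ((List.range (s.length - (i + 1))).map (fun x => i + 1 + x)) =
      (List.range (s.length - (i + 1))).countP
        (fun p => decide (s.getD (i + 1 + p) 0 ≤ s.getD i 0 + k)) := by
    rw [List.countP_map]
    apply List.countP_congr
    intro a _
    rfl
  omega

-- per-index: A's contribution to the running max equals B's, or both are ≤ 1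
lemma pvTerm (s : List Int) (hs : s.Pairwise (· ≤ ·)) (k no : Int) (j : Nat) (hj : j < s.length) :
    (min ((if pvFindMaxRight s k (j : Int) < (j : Int) ∨ pvFindMaxRight s k (j : Int) ≥ (s.length : Int)
            then (j : Int) else pvFindMaxRight s k (j : Int)) -
          (if pvFindMaxLeft s k (j : Int) < 0 ∨ pvFindMaxLeft s k (j : Int) > (j : Int)
            then (j : Int) else pvFindMaxLeft s k (j : Int)) + 1) (no + 1)
      = min (((s.countP (fun y => decide (y ≤ s.getD j 0 + k)) : Nat) : Int)
             - ((s.countP (fun y => decide (y < s.getD j 0 - k)) : Nat) : Int)) (no + 1)) ∨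
    (min ((if pvFindMaxRight s k (j : Int) < (j : Int) ∨ pvFindMaxRight s k (j : Int) ≥ (s.length : Int)
            then (j : Int) else pvFindMaxRight s k (j : Int)) -
          (if pvFindMaxLeft s k (j : Int) < 0 ∨ pvFindMaxLeft s k (j : Int) > (j : Int)
            then (j : Int) else pvFindMaxLeft s k (j : Int)) + 1) (no + 1) ≤ 1 ∧
      min (((s.countP (fun y => decide (y ≤ s.getD j 0 + k)) : Nat) : Int)
           - ((s.countP (fun y => decide (y < s.getD j 0 - k)) : Nat) : Int)) (no + 1) ≤ 1) := by
  set x := s.getD j 0 with hx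
  set L : Nat := (List.range j).countP (fun p => decide (s.getD p 0 < x - k)) with hL
  set R : Nat := (List.range (s.length - (j + 1))).countP
      (fun p => decide (s.getD (j + 1 + p) 0 ≤ x + k)) with hR
  have hLb : L ≤ j := by
    rw [hL]
    simpa using List.countP_le_length (p := fun p => decide (s.getD p 0 < x - k))
      (l := List.range j)
  have hRb : R ≤ s.length - (j + 1) := by
    rw [hR]
    simpa using List.countP_le_length (p := fun p => decide (s.getD (j + 1 + p) 0 ≤ x + k))
      (l := List.range (s.length - (j + 1)))
  have hml : pvFindMaxLeft s k (j : Int) = (L : Int) := pvFindMaxLeft_eq s hs k j hj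
  have hmr : pvFindMaxRight s k (j : Int) = (j : Int) + (R : Int) := pvFindMaxRight_eq s hs k j hj
  have hifL : (if pvFindMaxLeft s k (j : Int) < 0 ∨ pvFindMaxLeft s k (j : Int) > (j : Int)
      then (j : Int) else pvFindMaxLeft s k (j : Int)) = (L : Int) := by
    rw [hml]; rw [if_neg (by omega)]
  have hifR : (if pvFindMaxRight s k (j : Int) < (j : Int) ∨ pvFindMaxRight s k (j : Int) ≥ (s.length : Int)
      then (j : Int) else pvFindMaxRight s k (j : Int)) = (j : Int) + (R : Int) := by
    rw [hmr]; rw [if_neg (by omega)]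
  rw [hifL, hifR]
  by_cases hk : 0 ≤ k
  · left
    rw [pvCL s hs k hk j hj, pvCR s hs k hk j hj, ← hL, ← hR]
    push_cast
    omega
  · right
    have hLj : L = j := by
      rw [hL]
      have := List.countP_eq_length (l := List.range j)
        (p := fun p => decide (s.getD p 0 < x - k))
      rw [this.2 ?_]
      · simp
      · intro p hp
        have hple : s.getD p 0 ≤ x := by
          rw [hx]; exact pvGetDMono s hs (le_of_lt (List.mem_range.1 hp)) hj
        simp only [decide_eq_true_eq]
        omega
    have hR0 : R = 0 := by
      rw [hR]
      apply List.countP_eq_zero.2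
      intro p hp
      have hpx : x ≤ s.getD (j + 1 + p) 0 := by
        rw [hx]; exact pvGetDMono s hs (by omega) (by have := List.mem_range.1 hp; omega)
      simp only [decide_eq_true_eq]
      omega
    have hmono : s.countP (fun y => decide (y ≤ x + k)) ≤
        s.countP (fun y => decide (y < x - k)) := by
      apply List.countP_mono_left
      intro y _
      simp only [decide_eq_true_eq]
      omega
    rw [hLj, hR0]
    exact ⟨by omega, by omega⟩

-- ===== VERDICT (by name: the statement is the Claim_ definition above) =====
theorem maxFrequency_failed_spec : Claim_equal_maxFrequency_failed := by
  intro nums k no _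
  unfold Spec_maxFrequency_failed maxFrequency_failed maxFrequency_failed_alt
  set s := PySem.List.sorted nums (fun x => x) false with hsdef
  have hs : s.Pairwise (· ≤ ·) := by
    have := PySem.List.sorted_pairwise nums (fun x => x)
    simpa [hsdef] using this
  simp only []
  rw [PySem.List.pyRange_zero_natCast s.length, List.foldl_map]
  have hB := pvFoldStep s hs k no s.length 0 (by omega) 1 0 0 (by omega) (by omega)
    (by omega) (by omega) (by intro j hj _; omega) (by intro j hj _; omega)
  rw [List.drop_zero] at hB
  rw [← List.range_eq_range'] at hB
  rw [hB]
  apply pvFoldMax (List.range s.length)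
    (fun j => min ((if pvFindMaxRight s k (j : Int) < (j : Int) ∨ pvFindMaxRight s k (j : Int) ≥ (s.length : Int)
            then (j : Int) else pvFindMaxRight s k (j : Int)) -
          (if pvFindMaxLeft s k (j : Int) < 0 ∨ pvFindMaxLeft s k (j : Int) > (j : Int)
            then (j : Int) else pvFindMaxLeft s k (j : Int)) + 1) (no + 1))
    (fun j => min (((s.countP (fun y => decide (y ≤ s.getD j 0 + k)) : Nat) : Int)
                   - ((s.countP (fun y => decide (y < s.getD j 0 - k)) : Nat) : Int)) (no + 1))
    1 (le_refl _)
  intro j hj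
  exact pvTerm s hs k no j (List.mem_range.1 hj)
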